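-- pv_equiv track=rewrite | github.com/pantikak/test | ChangePassword.py | verify_repeat_char
-- ===== SOURCE A (Python) =====
-- def verify_repeat_char(new_password):
--     # No duplicate repeat characters more than 4
--     repeated = {}
--     for char in new_password:
--         if char in repeated:
--             repeated[char] += 1
--         else:
--             repeated[char] = 1
--
--     for key, value in repeated.items():
--         if value > 4:
--             return True
--     return False
-- ===== SOURCE B (Python) =====
-- def verify_repeat_char(new_password):
--     # Sort the characters so equal ones become adjacent, then scan for a run of 5.
--     run = 0
--     prev = None
--     for ch in sorted(new_password):
--         run = run + 1 if ch == prev else 1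
--         if run > 4:
--             return True
--         prev = ch
--     return False
-- ===== Notes on version B (the rewrite author's own statement) =====
-- stated objective: alternative
-- what changed: Replaces the frequency-dict build plus items scan with sort-then-scan: sort the characters so equal ones are adjacent, then a single run-length scan with early exit returns True at the first run of 5.
import Mathlib
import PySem

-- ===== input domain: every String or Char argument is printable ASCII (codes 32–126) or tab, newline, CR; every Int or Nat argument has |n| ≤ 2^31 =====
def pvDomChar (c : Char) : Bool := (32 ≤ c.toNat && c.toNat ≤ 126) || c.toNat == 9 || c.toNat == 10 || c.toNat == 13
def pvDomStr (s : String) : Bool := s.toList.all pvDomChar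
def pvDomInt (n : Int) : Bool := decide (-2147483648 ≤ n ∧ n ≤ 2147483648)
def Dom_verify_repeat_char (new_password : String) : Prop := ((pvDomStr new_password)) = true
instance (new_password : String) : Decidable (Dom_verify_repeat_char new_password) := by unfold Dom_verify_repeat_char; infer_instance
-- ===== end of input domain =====

-- B replaces A's frequency-dict build plus items scan by sort-then-scan: sort the characters
-- so equal ones are adjacent, then one run-length scan returns True at the first run of 5.

-- ===== PORT A =====
-- counts dict built char by char, then a scan over its items returning at the first value > 4
def verify_repeat_char (new_password : String) : Bool :=
  let repeated : PySem.Dict Char Int :=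
    new_password.toList.foldl
      (fun d char =>
        if d.contains char then d.insert char (d.getD char 0 + 1)
        else d.insert char 1)
      PySem.Dict.empty
  repeated.items.any (fun kv => decide (kv.2 > 4))

-- ===== PORT B =====
-- the loop body of Source B: run/prev accumulator over the sorted characters, early return on run > 4
def scanRun : List Char → Int → Option Char → Bool
  | [], _, _ => false
  | ch :: rest, run, prev =>
    let run' : Int := if some ch = prev then run + 1 else 1
    if run' > 4 then true else scanRun rest run' (some ch)

def verify_repeat_char_alt (new_password : String) : Bool :=
  scanRun (PySem.List.sorted new_password.toList (fun c => c) false) 0 none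

-- ===== PRECONDITION & SPEC =====
def Spec_verify_repeat_char (new_password : String) (out : Bool) : Prop := out = verify_repeat_char_alt new_password
instance (new_password : String) (out : Bool) : Decidable (Spec_verify_repeat_char new_password out) := by unfold Spec_verify_repeat_char; infer_instance

-- ===== CLAIM =====
def Claim_equal_verify_repeat_char : Prop := ∀ (new_password : String), Dom_verify_repeat_char new_password → Spec_verify_repeat_char new_password (verify_repeat_char new_password)

-- ===== LEMMAS AND PROOFS =====

-- A's contains-guarded update step is the Counter update step
theorem step_eq_counter_step (d : PySem.Dict Char Int) (c : Char) :
    (if d.contains c then d.insert c (d.getD c 0 + 1) else d.insert c 1) =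
      d.insert c (d.getD c 0 + 1) := by
  by_cases h : d.contains c = true
  · simp [h]
  · simp only [Bool.not_eq_true] at h
    rw [PySem.Dict.getD_of_not_contains (h := h)]
    simp [h]

-- any is the same over two lists with the same members
theorem any_eq_any_of_mem_iff {a : Type} (l1 l2 : List a) (p : a → Bool)
    (h : ∀ x, x ∈ l1 ↔ x ∈ l2) : l1.any p = l2.any p := by
  cases hb : l2.any p
  · simp only [List.any_eq_false] at hb ⊢
    exact fun x hx => hb x ((h x).mp hx)
  · simp only [List.any_eq_true] at hb ⊢
    obtain ⟨x, hx, hp⟩ := hb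
    exact ⟨x, (h x).mpr hx, hp⟩

-- any is congruent under a pointwise-on-members equal predicate
theorem any_congr_mem {a : Type} (l : List a) (p q : a → Bool)
    (h : ∀ x ∈ l, p x = q x) : l.any p = l.any q := by
  induction l with
  | nil => rfl
  | cons x t ih =>
    simp only [List.any_cons, h x (by simp),
      ih (fun y hy => h y (List.mem_cons_of_mem x hy))]

-- A's result, characterised: some character occurs more than 4 times
theorem portA_eq_any (s : String) :
    verify_repeat_char s = s.toList.any (fun c => decide (4 < s.toList.count c)) := by
  unfold verify_repeat_char
  have hstep : (fun (d : PySem.Dict Char Int) (char : Char) =>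
      if d.contains char then d.insert char (d.getD char 0 + 1) else d.insert char 1) =
      (fun d char => d.insert char (d.getD char 0 + 1)) := by
    funext d c; exact step_eq_counter_step d c
  rw [hstep, PySem.Dict.foldl_insert_getD_add_one_eq_counter]
  show (PySem.Dict.counter s.toList).items.any (fun kv => decide (kv.2 > 4)) = _
  rw [PySem.Dict.items_counter, List.any_map]
  have hpred : ((fun kv : Char × Int => decide (kv.2 > 4)) ∘
      (fun k => (k, (s.toList.count k : Int)))) =
      (fun c => decide (4 < s.toList.count c)) := by
    funext c
    rw [Function.comp_apply]
    show decide ((s.toList.count c : Int) > 4) = decide (4 < s.toList.count c)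
    rw [decide_eq_decide]
    constructor <;> intro h <;> exact_mod_cast h
  rw [hpred]
  exact any_eq_any_of_mem_iff _ _ _ (fun x => PySem.Set.mem_ofList _ x)

-- one scan step onto a repeated character
theorem scan_cons_eq (c : Char) (rest : List Char) (r : Int) :
    scanRun (c :: rest) r (some c) =
      if 4 < r + 1 then true else scanRun rest (r + 1) (some c) := by
  simp [scanRun]

-- a fresh head resets the run: previous run/prev are irrelevant
theorem scan_reset (ch : Char) (rest : List Char) (r : Int) (p : Option Char)
    (h : p ≠ some ch) : scanRun (ch :: rest) r p = scanRun (ch :: rest) 0 none := by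
  simp [scanRun, h.symm]

-- consuming a block of k copies of c while prev = c
theorem scan_block (k : Nat) (c : Char) (rest : List Char) (r : Int)
    (hr : 0 ≤ r) (h4 : r ≤ 4) :
    scanRun (List.replicate k c ++ rest) r (some c) =
      if 4 < r + k then true else scanRun rest (r + k) (some c) := by
  induction k generalizing r with
  | zero =>
    have h : ¬ (4 : Int) < r + (0 : Nat) := by push_cast; omega
    rw [List.replicate_zero, List.nil_append, if_neg h]
    norm_num
  | succ n ih =>
    rw [List.replicate_succ, List.cons_append, scan_cons_eq]
    by_cases h5 : (4 : Int) < r + 1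
    · have h6 : (4 : Int) < r + ((n + 1 : Nat) : Int) := by push_cast; omega
      rw [if_pos h5, if_pos h6]
    · rw [if_neg h5, ih (r + 1) (by omega) (by omega)]
      have harith : r + 1 + (n : Nat) = r + ((n + 1 : Nat) : Int) := by push_cast; ring
      rw [harith]

-- any over a nonempty constant block is the predicate at the constant
theorem any_replicate (m : Nat) (c : Char) (p : Char → Bool) (h : 1 ≤ m) :
    (List.replicate m c).any p = p c := by
  induction m with
  | zero => omega
  | succ n ih =>
    rw [List.replicate_succ, List.any_cons]
    cases n with
    | zero => simp
    | succ k =>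
      rw [ih (by omega)]
      cases p c <;> simp

-- main lemma: on a sorted list the run scan decides "some element occurs > 4 times"
theorem scan_sorted : ∀ (n : Nat) (l : List Char), l.length ≤ n →
    l.Pairwise (· ≤ ·) →
    scanRun l 0 none = l.any (fun c => decide (4 < l.count c)) := by
  intro n
  induction n with
  | zero =>
    intro l hl _
    have : l = [] := List.eq_nil_of_length_eq_zero (Nat.le_zero.mp hl)
    simp [this, scanRun]
  | succ n ih =>
    intro l hl hsorted
    cases l with
    | nil => simp [scanRun]
    | cons c t =>
      -- decompose: c :: t = replicate m c ++ rest, with c ∉ rest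
      set m := (List.takeWhile (fun y => y == c) (c :: t)).length with hm
      set rest := List.dropWhile (fun y => y == c) (c :: t) with hrest
      have hsplit : c :: t = List.replicate m c ++ rest := by
        rw [hm, hrest]
        conv_lhs => rw [← List.takeWhile_append_dropWhile (p := fun y => y == c) (l := c :: t)]
        congr 1
        apply List.eq_replicate_of_mem
        intro b hb
        have := List.mem_takeWhile_imp hb
        simpa using this
      have hmpos : 1 ≤ m := by
        rw [hm, List.takeWhile_cons]
        simp
      have hrest_sub : rest.Sublist (c :: t) := by rw [hrest]; exact List.dropWhile_sublist _
      have hrest_sorted : rest.Pairwise (· ≤ ·) := hsorted.sublist hrest_sub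
      have hhead_ne : ∀ x xs, rest = x :: xs → x ≠ c := by
        intro x xs hr
        have hxne : ¬ (x == c) = true := by
          have := List.head?_dropWhile_not (p := fun y => y == c) (l := c :: t)
          rw [← hrest, hr] at this
          simpa using this
        simpa using hxne
      have hnotc : c ∉ rest := by
        intro hmem
        cases hr : rest with
        | nil => rw [hr] at hmem; simp at hmem
        | cons x xs =>
          have hxc : x ≠ c := hhead_ne x xs hr
          have hcx : c ≤ x := by
            have hx_mem : x ∈ c :: t := hrest_sub.mem (by rw [hr]; simp)
            rcases List.mem_cons.mp hx_mem with h | h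
            · exact le_of_eq h.symm
            · exact (List.pairwise_cons.mp hsorted).1 x h
          have hlt : c < x := lt_of_le_of_ne hcx (Ne.symm hxc)
          rw [hr] at hmem
          rcases List.mem_cons.mp hmem with h | h
          · exact hxc h.symm
          · have := (List.pairwise_cons.mp (hr ▸ hrest_sorted)).1 c h
            exact absurd (lt_of_lt_of_le hlt this) (lt_irrefl c)
      have hcount_c : (c :: t).count c = m := by
        conv_lhs => rw [hsplit]
        simp [List.count_append, List.count_eq_zero.mpr hnotc]
      have hcount_rest : ∀ d ∈ rest, (c :: t).count d = rest.count d := by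
        intro d hd
        have hdc : d ≠ c := fun h => hnotc (h ▸ hd)
        conv_lhs => rw [hsplit]
        have hne : (c == d) = false := beq_eq_false_iff_ne.mpr (Ne.symm hdc)
        simp [List.count_append, List.count_replicate, hne]
      have htail : t = List.replicate (m - 1) c ++ rest := by
        have hs2 := hsplit
        rcases Nat.exists_eq_add_of_le hmpos with ⟨j, hj⟩
        have hj' : m = j + 1 := by omega
        have hm1 : m - 1 = j := by omega
        rw [hj', List.replicate_succ, List.cons_append] at hs2
        simp only [List.cons.injEq, true_and] at hs2
        rw [hm1]
        exact hs2
      have hlen_rest : rest.length ≤ n := by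
        have h1 : (c :: t).length = m + rest.length := by
          rw [hsplit]; simp
        have h2 : (c :: t).length ≤ n + 1 := hl
        omega
      have hih : scanRun rest 0 none = rest.any (fun d => decide (4 < rest.count d)) :=
        ih rest hlen_rest hrest_sorted
      -- LHS: one step onto c, consume the block, reset at the head of rest
      have hstep1 : scanRun (c :: t) 0 none = scanRun t 1 (some c) := by
        simp [scanRun]
      have hlhs : scanRun (c :: t) 0 none =
          if 4 < (m : Int) then true else scanRun rest 0 none := by
        rw [hstep1, htail, scan_block (m - 1) c rest 1 (by omega) (by omega)]
        have harith : (1 : Int) + ((m - 1 : Nat) : Int) = (m : Int) := by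
          have h1 : ((m - 1 : Nat) : Int) = (m : Int) - 1 := by push_cast [hmpos]; ring
          rw [h1]; ring
        rw [harith]
        by_cases h4 : 4 < (m : Int)
        · rw [if_pos h4, if_pos h4]
        · rw [if_neg h4, if_neg h4]
          cases hr : rest with
          | nil => simp [scanRun]
          | cons x xs =>
            have hxc : some c ≠ some x := by
              simpa using (hhead_ne x xs hr).symm
            exact scan_reset x xs (m : Int) (some c) hxc
      -- RHS: block contributes decide (4 < m); rest contributes its own any
      have hrhs : (c :: t).any (fun d => decide (4 < (c :: t).count d)) =
          (decide (4 < m) || rest.any (fun d => decide (4 < rest.count d))) := by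
        conv_lhs => rw [hsplit]
        rw [List.any_append, any_replicate m c _ hmpos]
        congr 1
        · rw [← hsplit, hcount_c]
        · rw [← hsplit]
          exact any_congr_mem rest _ _ (fun d hd => by rw [hcount_rest d hd])
      rw [hlhs, hrhs, ← hih]
      by_cases h4 : 4 < m
      · have h4' : 4 < (m : Int) := by exact_mod_cast h4
        simp [h4, h4']
      · have h4' : ¬ 4 < (m : Int) := by exact_mod_cast h4
        simp [h4, h4']

-- B's result, characterised the same way (via the sort being a permutation)
theorem portB_eq_any (s : String) :
    verify_repeat_char_alt s = s.toList.any (fun c => decide (4 < s.toList.count c)) := by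
  unfold verify_repeat_char_alt
  set l := s.toList
  set sl := PySem.List.sorted l (fun c => c) false with hsl
  have hperm : sl.Perm l := PySem.List.sorted_perm l (fun c => c) false
  have hpw : sl.Pairwise (· ≤ ·) := by
    have := PySem.List.sorted_pairwise l (fun c => c)
    simpa using this
  rw [scan_sorted sl.length sl le_rfl hpw,
    any_congr_mem sl _ (fun c => decide (4 < l.count c)) (fun c _ => by rw [hperm.count_eq])]
  exact any_eq_any_of_mem_iff _ _ _ (fun x => hperm.mem_iff)

-- ===== VERDICT =====
theorem verify_repeat_char_spec : Claim_equal_verify_repeat_char := by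
  intro s _
  unfold Spec_verify_repeat_char
  rw [portA_eq_any, portB_eq_any]
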